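-- pv_equiv track=rewrite | github.com/yanirmr/text-reuse-in-cairo-genizah | parser.py | split_by_brackets
-- ===== SOURCE A (Python) =====
-- import itertools
--
-- def split_by_brackets(text: str) -> list:
--     '''
--     :param text: transcription text with alternatives in parenthesis like "He (She) is nice"
--     :return: list of all alternative strings - ["He is nice", "She is nice"]
--     '''
--     words_list = text.split()
--     alter_words = []
--     skip_flag = False
--
--     for i in range(len(words_list)):
--         if skip_flag:
--             skip_flag = False
--             continue
--         if i == len(words_list) - 1:
--             if words_list[i].startswith("("):
--                 alter_words[-1].append(words_list[i][1:-1])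
--             else:
--                 alter_words.append([words_list[i]])
--         else:
--             if words_list[i + 1].startswith("("):
--                 alter_words.append([words_list[i], words_list[i + 1][1:-1]])
--                 skip_flag = True
--             elif words_list[i].startswith("("):
--                 alter_words[-1].append(words_list[i][1:-1])
--             else:
--                 alter_words.append([words_list[i]])
--
--     list_of_tups = list(itertools.product(*alter_words))
--     list_of_str = [' '.join(s) for s in list_of_tups]
--     return list_of_str
-- ===== SOURCE B (Python) =====
-- def split_by_brackets(text: str) -> list:
--     '''Same expansion, but: list-structural parse (consume one or two words per step,
--     no index/skip_flag) and an accumulating fold instead of itertools.product + join.'''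
--     words = text.split()
--     groups = []
--     while words:
--         w = words[0]
--         rest = words[1:]
--         if rest and rest[0].startswith("("):
--             groups.append([w, rest[0][1:-1]])
--             words = rest[1:]
--         elif w.startswith("("):
--             groups[-1].append(w[1:-1])
--             words = rest
--         else:
--             groups.append([w])
--             words = rest
--     if not groups:
--         return ['']
--     results = list(groups[0])
--     for group in groups[1:]:
--         results = [r + ' ' + w for r in results for w in group]
--     return results
-- ===== Notes on version B (the rewrite author's own statement) =====
-- stated objective: alternative
-- what changed: The indexed for-loop with a skip_flag look-ahead is replaced by a list-structural parse that consumes one or two words per step, and the itertools.product-then-join tail is replaced by an accumulating fold that extends partial strings group by group, never materializing tuples.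
-- outside the precondition, e.g. on split_by_brackets('('): A raises IndexError, B raises IndexError; on split_by_brackets('(a) b'): A raises IndexError, B raises IndexError
import Mathlib
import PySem

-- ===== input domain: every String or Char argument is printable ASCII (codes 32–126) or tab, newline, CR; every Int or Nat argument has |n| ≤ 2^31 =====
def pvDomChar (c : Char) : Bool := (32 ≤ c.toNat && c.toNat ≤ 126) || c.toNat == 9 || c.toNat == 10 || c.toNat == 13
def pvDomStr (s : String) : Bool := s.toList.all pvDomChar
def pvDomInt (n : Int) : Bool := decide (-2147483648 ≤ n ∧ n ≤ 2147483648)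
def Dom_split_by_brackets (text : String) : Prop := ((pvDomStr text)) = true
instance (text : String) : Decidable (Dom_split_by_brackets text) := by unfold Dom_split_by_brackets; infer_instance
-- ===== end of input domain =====

-- B replaces A's indexed skip_flag loop by a list-structural parse (consuming one or two
-- words per step) and A's itertools.product + ' '.join tail by an accumulating fold.

-- ===== PORT A =====

-- w[1:-1]
def pvStripParens (w : String) : String := PySem.Str.slice w (some 1) (some (-1))

-- alter_words[-1].append(x); Python raises IndexError on an empty list — excluded by Pre_
def pvAppendLast (gs : List (List String)) (x : String) : List (List String) :=
  match gs with
  | [] => []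
  | [g] => [g ++ [x]]
  | g :: gs' => g :: pvAppendLast gs' x

-- 'for i in range(len(words_list))' with the skip_flag, literally
def pvLoopA (ws : List String) (i : Nat) (alter : List (List String)) (skip : Bool) :
    List (List String) :=
  if _h : i < ws.length then
    if skip then pvLoopA ws (i + 1) alter false
    else if i = ws.length - 1 then
      if PySem.Str.startswith (ws.getD i "") "(" then
        pvLoopA ws (i + 1) (pvAppendLast alter (pvStripParens (ws.getD i ""))) skip
      else
        pvLoopA ws (i + 1) (alter ++ [[ws.getD i ""]]) skip
    else
      if PySem.Str.startswith (ws.getD (i + 1) "") "(" then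
        pvLoopA ws (i + 1) (alter ++ [[ws.getD i "", pvStripParens (ws.getD (i + 1) "")]]) true
      else if PySem.Str.startswith (ws.getD i "") "(" then
        pvLoopA ws (i + 1) (pvAppendLast alter (pvStripParens (ws.getD i ""))) false
      else
        pvLoopA ws (i + 1) (alter ++ [[ws.getD i ""]]) false
  else alter
termination_by ws.length - i

-- list(itertools.product(*alter_words))
def pvProduct : List (List String) → List (List String)
  | [] => [[]]
  | g :: gs => g.flatMap (fun x => (pvProduct gs).map (x :: ·))

def split_by_brackets (text : String) : List String :=
  let words_list := PySem.Str.split₀ text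
  let alter_words := pvLoopA words_list 0 [] false
  (pvProduct alter_words).map (fun s => PySem.Str.join " " s)

-- ===== PORT B =====

-- B's while loop over the word list, consuming one or two words per step
def pvParseB : List String → List (List String) → List (List String)
  | [], groups => groups
  | [w], groups =>
      if PySem.Str.startswith w "(" then pvAppendLast groups (pvStripParens w)
      else groups ++ [[w]]
  | w :: v :: rest', groups =>
      if PySem.Str.startswith v "(" then pvParseB rest' (groups ++ [[w, pvStripParens v]])
      else if PySem.Str.startswith w "(" then pvParseB (v :: rest') (pvAppendLast groups (pvStripParens w))
      else pvParseB (v :: rest') (groups ++ [[w]])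

def split_by_brackets_alt (text : String) : List String :=
  match pvParseB (PySem.Str.split₀ text) [] with
  | [] => [""]
  | g :: gs => gs.foldl (fun res grp => res.flatMap (fun r => grp.map (fun w => r ++ " " ++ w))) g

-- ===== PRECONDITION & SPEC =====
-- Pre_ excludes exactly the inputs where the Python A raises IndexError (alter_words[-1]
-- on an empty list): a first word starting with '(' that is not immediately followed by
-- another '('-word.  B raises the same IndexError there.
def Pre_split_by_brackets (text : String) : Prop :=
  PySem.Str.split₀ text = [] ∨
  ¬ (PySem.Str.startswith ((PySem.Str.split₀ text).headD "") "(" = true) ∨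
  (2 ≤ (PySem.Str.split₀ text).length ∧
    PySem.Str.startswith ((PySem.Str.split₀ text).getD 1 "") "(" = true)
instance (text : String) : Decidable (Pre_split_by_brackets text) := by
  unfold Pre_split_by_brackets; infer_instance

def pvWitness_split_by_brackets : String := "He (She) is nice"

def Spec_split_by_brackets (text : String) (out : List String) : Prop := out = split_by_brackets_alt text
instance (text : String) (out : List String) : Decidable (Spec_split_by_brackets text out) := by unfold Spec_split_by_brackets; infer_instance

-- ===== CLAIM (what is proved, stated in full; the proofs are below) =====
def Claim_equal_split_by_brackets : Prop := ∀ (text : String), Dom_split_by_brackets text → Pre_split_by_brackets text → Spec_split_by_brackets text (split_by_brackets text)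

-- ===== LEMMAS AND PROOFS =====

-- a skipped index just advances the loop
lemma pvLoopA_skip (ws : List String) (i : Nat) (alter : List (List String)) :
    pvLoopA ws i alter true = pvLoopA ws (i + 1) alter false := by
  by_cases h : i < ws.length
  · rw [pvLoopA]; simp [h]
  · rw [pvLoopA, pvLoopA]; simp [h]; omega

lemma pvLoopA_stop (ws : List String) (i : Nat) (alter : List (List String)) (skip : Bool)
    (h : ws.length ≤ i) : pvLoopA ws i alter skip = alter := by
  rw [pvLoopA]; simp [Nat.not_lt.mpr h]

lemma getD_of_drop (ws : List String) (i : Nat) (w : String) (t : List String)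
    (hd : ws.drop i = w :: t) : ws.getD i "" = w := by
  have : ws[i]? = some w := by
    have h0 := List.getElem?_drop (xs := ws) (i := i) (j := 0)
    rw [hd] at h0; simpa using h0.symm
  simp [List.getD, this]

lemma drop_succ_of_drop (ws : List String) (i : Nat) (w : String) (t : List String)
    (hd : ws.drop i = w :: t) : ws.drop (i + 1) = t := by
  rw [← List.drop_drop, hd]; rfl

-- A's indexed loop equals B's structural parse, from any position i
lemma pvLoopA_eq_parseB (ws : List String) (i : Nat) (alter : List (List String)) :
    pvLoopA ws i alter false = pvParseB (ws.drop i) alter := by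
  induction hn : ws.length - i using Nat.strong_induction_on generalizing i alter with
  | _ n IH =>
  match hd : ws.drop i with
  | [] =>
    have hlen : ws.length ≤ i := List.drop_eq_nil_iff.mp hd
    rw [pvLoopA_stop ws i alter false hlen]; simp [pvParseB]
  | [w] =>
    have h1 : (ws.drop i).length = 1 := by rw [hd]; rfl
    have hlen : ws.length - i = 1 := by simpa using h1
    have hi : i < ws.length := by omega
    have hlast : i = ws.length - 1 := by omega
    have hw : ws.getD i "" = w := getD_of_drop ws i w _ hd
    have hstop : ws.length ≤ i + 1 := by omega
    rw [pvLoopA, dif_pos hi]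
    simp only [if_neg Bool.false_ne_true, if_pos hlast, hw, pvParseB,
      pvLoopA_stop ws (i+1) _ _ hstop]
  | w :: v :: rest =>
    have h2 : 2 ≤ (ws.drop i).length := by rw [hd]; simp
    have hlen2 : 2 ≤ ws.length - i := by simpa using h2
    have hi : i < ws.length := by omega
    have hnlast : ¬ i = ws.length - 1 := by omega
    have hw : ws.getD i "" = w := getD_of_drop ws i w _ hd
    have hd1 : ws.drop (i + 1) = v :: rest := drop_succ_of_drop ws i w _ hd
    have hv : ws.getD (i + 1) "" = v := getD_of_drop ws (i+1) v _ hd1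
    have hd2 : ws.drop (i + 2) = rest := drop_succ_of_drop ws (i+1) v _ hd1
    rw [pvLoopA, dif_pos hi]
    simp only [if_neg Bool.false_ne_true, if_neg hnlast, hw, hv, pvParseB]
    by_cases hsv : PySem.Str.startswith v "(" = true
    · rw [if_pos hsv, if_pos hsv, pvLoopA_skip,
        IH (ws.length - (i + 2)) (by omega) (i + 2) _ rfl, hd2]
    · rw [if_neg hsv, if_neg hsv]
      by_cases hsw : PySem.Str.startswith w "(" = true
      · rw [if_pos hsw, if_pos hsw,
          IH (ws.length - (i + 1)) (by omega) (i + 1) _ rfl, hd1]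
      · rw [if_neg hsw, if_neg hsw,
          IH (ws.length - (i + 1)) (by omega) (i + 1) _ rfl, hd1]

-- a left fold of ' '-separated concatenations factors out a prefix
lemma foldl_sep_prepend (rest : List (List Char)) (c p : List Char) :
    rest.foldl (fun a x => a ++ [' '] ++ x) (c ++ p) = c ++ rest.foldl (fun a x => a ++ [' '] ++ x) p := by
  induction rest generalizing p with
  | nil => rfl
  | cons q qs IH =>
    rw [List.foldl_cons, List.foldl_cons,
      show c ++ p ++ [' '] ++ q = c ++ (p ++ [' '] ++ q) from by simp]
    exact IH _

lemma chars_join_eq_foldl (t : List (List Char)) (c : List Char) :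
    PySem.Chars.join [' '] (c :: t) = t.foldl (fun a x => a ++ [' '] ++ x) c := by
  induction t generalizing c with
  | nil => simp [PySem.Chars.join_singleton]
  | cons q rest IH =>
    rw [PySem.Chars.join_cons_cons, List.foldl_cons, IH q,
      show c ++ [' '] ++ q = (c ++ [' ']) ++ q from by simp,
      foldl_sep_prepend rest (c ++ [' ']) q]

-- ' '.join(w :: t) as a left fold of string concatenations
lemma join_eq_foldl (t : List String) (w : String) :
    PySem.Str.join " " (w :: t) = t.foldl (fun a x => a ++ " " ++ x) w := by
  apply String.toList_inj.mp
  rw [PySem.Str.toList_join]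
  have htl : ∀ (l : List String) (a : String),
      (l.foldl (fun a x => a ++ " " ++ x) a).toList
        = (l.map String.toList).foldl (fun a x => a ++ [' '] ++ x) a.toList := by
    intro l
    induction l with
    | nil => intro a; rfl
    | cons x xs IH => intro a; simp only [List.foldl_cons, List.map_cons, IH]; congr 1
                      simp [String.toList_append]
  rw [htl]
  simpa using chars_join_eq_foldl (t.map String.toList) w.toList

-- B's accumulating fold computes map-join over A's Cartesian product
lemma foldl_eq_product (gs : List (List String)) (init : List String) :
    gs.foldl (fun res grp => res.flatMap (fun r => grp.map (fun w => r ++ " " ++ w))) init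
      = init.flatMap (fun r => (pvProduct gs).map (fun tup => tup.foldl (fun a x => a ++ " " ++ x) r)) := by
  induction gs generalizing init with
  | nil => simp [pvProduct]
  | cons g gs IH =>
    rw [List.foldl_cons, IH, pvProduct]
    rw [List.flatMap_assoc]
    simp only [List.flatMap_map, List.map_flatMap, List.map_map, Function.comp_def]
    rfl

lemma map_join_product (groups : List (List String)) :
    (pvProduct groups).map (fun s => PySem.Str.join " " s)
      = (match groups with
         | [] => [""]
         | g :: gs => gs.foldl (fun res grp => res.flatMap (fun r => grp.map (fun w => r ++ " " ++ w))) g) := by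
  match groups with
  | [] => rfl
  | g :: gs =>
    show _ = gs.foldl _ g
    rw [foldl_eq_product, pvProduct]
    simp only [List.map_flatMap, List.map_map, Function.comp_def, join_eq_foldl]

-- ===== VERDICT (by name: the statement is the Claim_ definition above) =====
theorem split_by_brackets_spec : Claim_equal_split_by_brackets := by
  intro text _ _
  unfold Spec_split_by_brackets
  show (pvProduct (pvLoopA (PySem.Str.split₀ text) 0 [] false)).map (fun s => PySem.Str.join " " s)
      = split_by_brackets_alt text
  rw [pvLoopA_eq_parseB (PySem.Str.split₀ text) 0 [], List.drop_zero, map_join_product]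
  rfl
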